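-- pv_equiv track=rewrite | github.com/Freshman23/algorithms_and_data_structures | lesson_4/les_4_task_1b.py | matrix_func
-- ===== SOURCE A (Python) =====
-- def matrix_func(matrix):
--
--     row_mins = []
--     for col in range(len(matrix[0])):
--         col_lst = []
--         for row in range(len(matrix)):
--             col_lst.append(matrix[row][col])
--         row_mins.append(min(col_lst))
--
--     return max(row_mins)
-- ===== SOURCE B (Python) =====
-- def matrix_func(matrix):
--     col_min = list(matrix[0])
--     for row in matrix[1:]:
--         for col in range(len(col_min)):
--             col_min[col] = min(col_min[col], row[col])
--     return max(col_min)
-- ===== Notes on version B (the rewrite author's own statement) =====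
-- stated objective: alternative
-- what changed: Replaces the column-major build-each-column-then-min nested loops by a single row-major fold that maintains a running array of per-column minima updated in place, then takes one max.
import Mathlib
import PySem

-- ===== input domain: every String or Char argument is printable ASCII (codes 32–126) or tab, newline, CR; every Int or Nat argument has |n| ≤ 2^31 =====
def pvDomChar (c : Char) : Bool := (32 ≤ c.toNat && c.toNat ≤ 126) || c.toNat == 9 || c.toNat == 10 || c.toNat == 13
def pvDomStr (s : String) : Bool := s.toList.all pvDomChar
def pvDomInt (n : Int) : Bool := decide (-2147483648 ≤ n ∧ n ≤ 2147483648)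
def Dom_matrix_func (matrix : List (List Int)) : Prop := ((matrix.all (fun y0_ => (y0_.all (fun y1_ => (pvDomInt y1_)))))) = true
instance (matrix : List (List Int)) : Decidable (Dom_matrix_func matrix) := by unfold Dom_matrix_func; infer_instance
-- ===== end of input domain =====

-- B is an alternative decomposition (row-major fold of a running per-column-minimum array)
-- of A's column-major build-then-min loops; equal cost, no speed claim.

-- ===== PORT A =====
-- Indices produced by range(...) are nonnegative, so matrix[row][col] is ported as
-- Nat-indexed getD; out-of-range access (Python IndexError) is excluded by Pre_.
def matrix_func (matrix : List (List Int)) : Int :=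
  let row_mins := (List.range (matrix.headD []).length).foldl
    (fun rm col =>
      let col_lst := (List.range matrix.length).foldl
        (fun cl row => cl ++ [(matrix.getD row []).getD col 0]) []
      rm ++ [(PySem.List.min? col_lst (fun y => y)).getD 0]) []
  (PySem.List.max? row_mins (fun y => y)).getD 0

-- ===== PORT B =====
-- col_min = list(matrix[0]); for row in matrix[1:]: update col_min pointwise; max(col_min).
-- Python raises on [] (IndexError); that input is outside Pre_, the port returns 0 there.
def matrix_func_alt (matrix : List (List Int)) : Int :=
  match matrix with
  | [] => 0
  | r0 :: rest =>
    let colMin := rest.foldl (fun cm row =>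
        (List.range r0.length).foldl
          (fun c col => c.set col (min (c.getD col 0) (row.getD col 0))) cm) r0
    (PySem.List.max? colMin (fun y => y)).getD 0

-- ===== PRECONDITION & SPEC =====
-- Pre_ = exactly where Python A returns: a nonempty matrix with a nonempty first row
-- (else IndexError / ValueError on max), and every row at least as long as the first
-- (else IndexError on matrix[row][col]).
def Pre_matrix_func (matrix : List (List Int)) : Prop :=
  matrix ≠ [] ∧ matrix.headD [] ≠ [] ∧ ∀ r ∈ matrix, (matrix.headD []).length ≤ r.length
instance (matrix : List (List Int)) : Decidable (Pre_matrix_func matrix) := by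
  unfold Pre_matrix_func; infer_instance

def pvWitness_matrix_func : List (List Int) := [[1, 2, 3], [4, 0, 6]]

def Spec_matrix_func (matrix : List (List Int)) (out : Int) : Prop := out = matrix_func_alt matrix
instance (matrix : List (List Int)) (out : Int) : Decidable (Spec_matrix_func matrix out) := by
  unfold Spec_matrix_func; infer_instance

-- ===== CLAIM (what is proved, stated in full; the proofs are below) =====
def Claim_equal_matrix_func : Prop := ∀ (matrix : List (List Int)), Dom_matrix_func matrix → Pre_matrix_func matrix → Spec_matrix_func matrix (matrix_func matrix)

-- ===== LEMMAS AND PROOFS =====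

/-- folding `acc ++ [g x]` is `map`. -/
theorem foldl_append_singleton {α β : Type} (g : α → β) :
    ∀ (l : List α) (acc : List β), l.foldl (fun a x => a ++ [g x]) acc = acc ++ l.map g := by
  intro l
  induction l with
  | nil => simp
  | cons x t ih => intro acc; simp [ih]

/-- mapping `getD` over the index range is mapping over the list itself. -/
theorem map_range_getD {α β : Type} (f : α → β) (d : α) :
    ∀ (l : List α), (List.range l.length).map (fun i => f (l.getD i d)) = l.map f := by
  intro l
  induction l with
  | nil => simp
  | cons x t ih =>
    simp only [List.length_cons, List.range_succ_eq_map, List.map_cons, List.map_map]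
    simpa using ih

/-- the inner range-fold of B preserves length. -/
theorem foldset_length (row : List Int) (k : Nat) (cm : List Int) :
    ((List.range k).foldl
      (fun c col => c.set col (min (c.getD col 0) (row.getD col 0))) cm).length = cm.length := by
  induction k with
  | zero => simp
  | succ k ih =>
    rw [List.range_succ, List.foldl_append, List.foldl_cons, List.foldl_nil,
      List.length_set, ih]

/-- elementwise value of the inner range-fold of B. -/
theorem foldset_getD (row cm : List Int) (k col : Nat) (hcol : col < cm.length) :
    ((List.range k).foldl
      (fun c col => c.set col (min (c.getD col 0) (row.getD col 0))) cm).getD col 0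
    = if col < k then min (cm.getD col 0) (row.getD col 0) else cm.getD col 0 := by
  induction k with
  | zero => simp
  | succ k ih =>
    rw [List.range_succ, List.foldl_append, List.foldl_cons, List.foldl_nil]
    have hlen := foldset_length row k cm
    rw [List.getD_eq_getElem?_getD, List.getElem?_set]
    by_cases hck : k = col
    · subst hck
      rw [if_pos rfl, hlen, if_pos hcol, Option.getD_some, ih,
        if_neg (Nat.lt_irrefl k), if_pos (Nat.lt_succ_self k)]
    · rw [if_neg hck, ← List.getD_eq_getElem?_getD, ih]
      by_cases h1 : col < k
      · rw [if_pos h1, if_pos (by omega)]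
      · rw [if_neg h1, if_neg (by omega)]

/-- length of B's rows-fold. -/
theorem rowsfold_length (n : Nat) :
    ∀ (rest : List (List Int)) (cm : List Int),
      (rest.foldl (fun cm row =>
        (List.range n).foldl
          (fun c col => c.set col (min (c.getD col 0) (row.getD col 0))) cm) cm).length
      = cm.length := by
  intro rest
  induction rest with
  | nil => simp
  | cons r t ih =>
    intro cm
    rw [List.foldl_cons, ih, foldset_length]

/-- elementwise value of B's rows-fold. -/
theorem rowsfold_getD (n : Nat) :
    ∀ (rest : List (List Int)) (cm : List Int), cm.length = n → ∀ col, col < n →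
      (rest.foldl (fun cm row =>
        (List.range n).foldl
          (fun c col => c.set col (min (c.getD col 0) (row.getD col 0))) cm) cm).getD col 0
      = rest.foldl (fun a r => min a (r.getD col 0)) (cm.getD col 0) := by
  intro rest
  induction rest with
  | nil => intro cm _ col _; simp
  | cons r t ih =>
    intro cm hlen col hcol
    rw [List.foldl_cons, List.foldl_cons]
    have hstep_len : ((List.range n).foldl
        (fun c col => c.set col (min (c.getD col 0) (r.getD col 0))) cm).length = n := by
      rw [foldset_length, hlen]
    rw [ih _ hstep_len col hcol]
    rw [foldset_getD r cm n col (by omega)]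
    simp [hcol]

-- ===== VERDICT (by name: the statement is the Claim_ definition above) =====
theorem matrix_func_spec : Claim_equal_matrix_func := by
  intro matrix _ _
  unfold Spec_matrix_func
  cases matrix with
  | nil => rfl
  | cons r0 rest =>
    set M : List Int := (List.range r0.length).map
      (fun col => rest.foldl (fun a r => min a (r.getD col 0)) (r0.getD col 0)) with hM
    have hA : (List.range ((r0 :: rest).headD []).length).foldl
        (fun rm col =>
          rm ++ [(PySem.List.min?
            ((List.range (r0 :: rest).length).foldl
              (fun cl row => cl ++ [((r0 :: rest).getD row []).getD col 0]) [])
            (fun y => y)).getD 0]) [] = M := by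
      rw [foldl_append_singleton]
      simp only [List.headD_cons, List.nil_append, hM]
      apply List.map_congr_left
      intro col _
      rw [foldl_append_singleton (fun row => ((r0 :: rest).getD row []).getD col 0)]
      rw [List.nil_append, map_range_getD (fun r => r.getD col 0) ([] : List Int) (r0 :: rest)]
      simp only [List.map_cons]
      rw [PySem.List.min?_id_cons]
      simp [List.foldl_map]
    have hB : (rest.foldl (fun cm row =>
        (List.range r0.length).foldl
          (fun c col => c.set col (min (c.getD col 0) (row.getD col 0))) cm) r0) = M := by
      apply List.ext_getElem
      · rw [rowsfold_length, hM]; simp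
      · intro i h1 h2
        have hlen : (rest.foldl (fun cm row =>
            (List.range r0.length).foldl
              (fun c col => c.set col (min (c.getD col 0) (row.getD col 0))) cm) r0).length
            = r0.length := rowsfold_length r0.length rest r0
        have hi : i < r0.length := by rwa [hlen] at h1
        have hgd := rowsfold_getD r0.length rest r0 rfl i hi
        rw [List.getElem_eq_getD (fallback := 0), List.getElem_eq_getD (fallback := 0)]
        rw [hgd]
        simp [hM, List.getD_eq_getElem?_getD, hi]
    simp only [matrix_func, matrix_func_alt]
    rw [hA, hB]
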